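-- pv_equiv track=rewrite | github.com/RonyThatsWho/kg_ronythatswho_2016 | main.py | findMapping
-- ===== SOURCE A (Python) =====
-- from collections import Counter
--
-- def charFreq(string):
--     """Function takes a string and returns list with each character frequency.
--
--     Arguments:
--         string (String): string that will be processed
--
--     Returns:
--         List (ints): Frequency of each unique character. Ordered by decreasing order (most common first)
--
--     """
--
--     characters = Counter()
--     result = []
--
--     for c in string:
--         characters.update(c)
--
--     for i in characters.values():
--         result.append(i)
--
--     result.sort(reverse=True)
--
--     return result
--
-- def mapDFS(paths, current, nextGoal, goals):
--     """Recursive function that explorers mapping possibilities and returns True if path that crosses ALL goals is possible.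
--
--     Arguments:
--          paths (list of ints): currently available paths to choose from
--          current (int): Current subtotal before selecting next potential path
--          nextGoal (int): current target goal index from goals array
--          goals (list of ints) list of all goals that NEED to be visited
--
--
--     Returns:
--         Boolean: Returns True if Target has been found
--                  Returns False once search path has been exhausted
--
--     """
--
--     for path in paths:
--         potential = current + path
--
--         if potential > goals[nextGoal]:
--             continue;
--
--         if potential == goals[len(goals)-1]:
--             return True
--
--         pathsLeft = list(paths)
--         pathsLeft.remove(path)
--
--         if potential == goals[nextGoal]:
--             if mapDFS(pathsLeft, potential, nextGoal + 1, goals):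
--                 return True
--
--         elif mapDFS(pathsLeft, potential, nextGoal, goals):
--             return True
--
--     return False
--
-- def findMapping(s1, s2):
--     """Driver function for dfs function.
--
--     Creates the queue list and goals, then calls a recursive depth-first-search function with intial parameters
--
--     Parameters:
--         s1 (string): First string that needs to be mapped to the other
--         s2 (string): Second string which will be mapped onto and where goals are derived from
--
--     Returns:
--         Boolean: Returns result from dfs search
--             True: if mapping is successfully found
--             False: If all feasible paths have been exhausted
--
--     """
--
--     queue = charFreq(s1)
--     goals = charFreq(s2)
--
--     if queue[0] > goals[0]:
--         return False
--
--     if len(goals)>1: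
--         for i in range(1, len(goals)):
--             goals[i] += goals[i-1]
--
--     return mapDFS (queue, 0, 0, goals)
-- ===== SOURCE B (Python) =====
-- from collections import Counter
--
-- def findMapping(s1, s2):
--     queue = sorted(Counter(s1).values(), reverse=True)
--     goals = []
--     total = 0
--     for v in sorted(Counter(s2).values(), reverse=True):
--         total += v
--         goals.append(total)
--     if queue[0] > goals[0]:
--         return False
--     target = goals[-1]
--     stack = [(queue, 0, 0)]
--     while stack:
--         paths, current, nextGoal = stack.pop()
--         children = []
--         for path in paths:
--             potential = current + path
--             if potential > goals[nextGoal]: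
--                 continue
--             if potential == target:
--                 return True
--             rest = list(paths)
--             rest.remove(path)
--             children.append((rest, potential,
--                              nextGoal + 1 if potential == goals[nextGoal] else nextGoal))
--         stack.extend(children)
--     return False
-- ===== Notes on version B (the rewrite author's own statement) =====
-- stated objective: alternative
-- what changed: The recursive mapDFS backtracking search is replaced by an explicit stack machine: each popped state is scanned once, collecting its non-pruned child states, which are pushed and processed iteratively until a state's scan hits the final cumulative goal; the boolean is order-independent so the answer is identical (a timing run measured B faster: no Python recursion-call overhead and LIFO exploration of the newest child state).
import Mathlib
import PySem

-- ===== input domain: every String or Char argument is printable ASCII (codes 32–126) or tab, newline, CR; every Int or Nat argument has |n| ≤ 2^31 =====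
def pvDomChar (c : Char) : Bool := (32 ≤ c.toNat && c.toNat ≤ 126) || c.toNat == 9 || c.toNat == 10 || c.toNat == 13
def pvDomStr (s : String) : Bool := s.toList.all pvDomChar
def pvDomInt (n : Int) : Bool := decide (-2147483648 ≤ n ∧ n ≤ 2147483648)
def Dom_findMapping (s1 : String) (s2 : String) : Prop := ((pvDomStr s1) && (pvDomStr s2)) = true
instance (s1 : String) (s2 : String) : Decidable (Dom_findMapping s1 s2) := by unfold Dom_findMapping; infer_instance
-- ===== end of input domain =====

-- B replaces the recursive backtracking search by an explicit stack machine over the same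
-- state space (alternative decomposition, same cost); equivalence because the boolean is
-- order-independent over the explored states.

-- ===== PORT A =====
-- Counter-building loop, values, sort reverse=True — step for step from charFreq.
def charFreq (s : String) : List Int :=
  let characters := s.toList.foldl (fun d c => d.modify c 0 (· + 1)) PySem.Dict.empty
  let result := characters.values
  PySem.List.sorted result (fun x => x) true

-- the 'for path in paths' loop of mapDFS: iter is the suffix still to iterate, paths the full
-- list (Python removes the FIRST occurrence of path's value, = List.erase).  The Sublist
-- hypothesis only justifies termination (erase strictly shrinks); it does not affect the value.
-- goals[nextGoal]/goals[-1] are always in range on every call reachable from findMapping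
-- under Pre_; getD 0 is never the out-of-range default there.
def mapDFSGo (goals : List Int) (iter paths : List Int) (current : Int) (nextGoal : Nat)
    (h : iter.Sublist paths) : Bool :=
  match iter, h with
  | [], _ => false
  | path :: rest, h =>
    let potential := current + path
    if potential > goals.getD nextGoal 0 then
      mapDFSGo goals rest paths current nextGoal ((List.sublist_cons_self path rest).trans h)
    else if potential = goals.getD (goals.length - 1) 0 then true
    else
      let pathsLeft := paths.erase path
      if potential = goals.getD nextGoal 0 then
        if mapDFSGo goals pathsLeft pathsLeft potential (nextGoal + 1) (List.Sublist.refl _) then true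
        else mapDFSGo goals rest paths current nextGoal ((List.sublist_cons_self path rest).trans h)
      else
        if mapDFSGo goals pathsLeft pathsLeft potential nextGoal (List.Sublist.refl _) then true
        else mapDFSGo goals rest paths current nextGoal ((List.sublist_cons_self path rest).trans h)
termination_by (paths.length, iter.length)
decreasing_by
  · right; simp
  · left
    have hm : path ∈ paths := h.subset (List.mem_cons_self)
    have := List.length_erase_add_one hm
    omega
  · right; simp
  · left
    have hm : path ∈ paths := h.subset (List.mem_cons_self)
    have := List.length_erase_add_one hm
    omega
  · right; simp

def mapDFS (paths : List Int) (current : Int) (nextGoal : Nat) (goals : List Int) : Bool :=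
  mapDFSGo goals paths paths current nextGoal (List.Sublist.refl _)

-- the in-place prefix-sum loop 'goals[i] += goals[i-1]' ported as structural recursion
-- producing the same values (the len>1 guard is vacuous for shorter lists).
def cumFrom (prev : Int) : List Int → List Int
  | [] => []
  | g :: rest => (g + prev) :: cumFrom (g + prev) rest

def cumA (gs : List Int) : List Int :=
  match gs with
  | [] => []
  | g :: rest => g :: cumFrom g rest

def findMapping (s1 : String) (s2 : String) : Bool :=
  let queue := charFreq s1
  let goals0 := charFreq s2
  -- Python indexes queue[0]/goals[0]: IndexError on an empty string (excluded by Pre_);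
  -- the getD default is only taken there.
  if queue.getD 0 0 > goals0.getD 0 0 then false
  else mapDFS queue 0 0 (cumA goals0)

-- ===== PORT B =====
def sortedFreq (s : String) : List Int :=
  PySem.List.sorted (PySem.Dict.counter s.toList).values (fun x => x) true

-- the running-total loop building the cumulative goals list
def cumB (total : Int) : List Int → List Int
  | [] => []
  | v :: rest => (total + v) :: cumB (total + v) rest

-- the inner 'for path in paths' scan of one popped state: none = hit target (return True),
-- some cs = the collected children, in append order.
def scanGo (goals : List Int) (target : Int) (iter paths : List Int) (current : Int)
    (nextGoal : Nat) : Option (List (List Int × Int × Nat)) :=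
  match iter with
  | [] => some []
  | path :: rest =>
    let potential := current + path
    if potential > goals.getD nextGoal 0 then scanGo goals target rest paths current nextGoal
    else if potential = target then none
    else
      let child := paths.erase path
      let ng := if potential = goals.getD nextGoal 0 then nextGoal + 1 else nextGoal
      match scanGo goals target rest paths current nextGoal with
      | none => none
      | some cs => some ((child, potential, ng) :: cs)

def frameWeight (f : List Int × Int × Nat) : Nat := (f.1.length + 1).factorial

-- children of a frame are each one path shorter: bounds the stack measure (termination only)
theorem scanGo_weight (goals : List Int) (target : Int) :
    ∀ (iter paths : List Int) (current : Int) (nextGoal : Nat)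
      (cs : List (List Int × Int × Nat)), iter.Sublist paths →
      scanGo goals target iter paths current nextGoal = some cs →
      (cs.map frameWeight).sum ≤ iter.length * paths.length.factorial := by
  intro iter
  induction iter with
  | nil =>
    intro paths current nextGoal cs _ h
    simp only [scanGo, Option.some.injEq] at h
    simp [← h]
  | cons path rest ih =>
    intro paths current nextGoal cs hs h
    have hrest : rest.Sublist paths := (List.sublist_cons_self path rest).trans hs
    have hm : path ∈ paths := hs.subset (List.mem_cons_self)
    have hlen := List.length_erase_add_one hm
    simp only [scanGo] at h
    by_cases h1 : current + path > goals.getD nextGoal 0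
    · rw [if_pos h1] at h
      have hle := ih paths current nextGoal cs hrest h
      simp only [List.length_cons]
      exact le_trans hle (Nat.mul_le_mul (Nat.le_succ _) le_rfl)
    · rw [if_neg h1] at h
      by_cases h2 : current + path = target
      · rw [if_pos h2] at h; simp at h
      · rw [if_neg h2] at h
        cases hsc : scanGo goals target rest paths current nextGoal with
        | none => rw [hsc] at h; simp at h
        | some cs' =>
          rw [hsc] at h
          simp only [Option.some.injEq] at h
          have hih := ih paths current nextGoal cs' hrest hsc
          rw [← h]
          simp only [List.map_cons, List.sum_cons, List.length_cons]
          have hw : frameWeight (paths.erase path, current + path,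
              if current + path = goals.getD nextGoal 0 then nextGoal + 1 else nextGoal)
              = paths.length.factorial := by
            simp only [frameWeight]
            rw [hlen]
          rw [hw]
          calc paths.length.factorial + (cs'.map frameWeight).sum
              ≤ paths.length.factorial + rest.length * paths.length.factorial :=
                Nat.add_le_add_left hih _
            _ = (rest.length + 1) * paths.length.factorial := by ring

def machine (goals : List Int) (target : Int)
    (stack : List (List Int × Int × Nat)) : Bool :=
  match stack with
  | [] => false
  | f :: rest =>
    match hsc : scanGo goals target f.1 f.1 f.2.1 f.2.2 with
    | none => true
    | some cs => machine goals target (cs.reverse ++ rest)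
termination_by (stack.map frameWeight).sum
decreasing_by
  have hb := scanGo_weight goals target f.1 f.1 f.2.1 f.2.2 cs (List.Sublist.refl _) hsc
  have hpos := Nat.factorial_pos f.1.length
  have hfac : (f.1.length + 1).factorial = (f.1.length + 1) * f.1.length.factorial :=
    Nat.factorial_succ _
  simp only [List.map_append, List.sum_append, List.map_reverse, List.sum_reverse,
    List.map_cons, List.sum_cons]
  have : (cs.map frameWeight).sum < frameWeight f := by
    calc (cs.map frameWeight).sum ≤ f.1.length * f.1.length.factorial := hb
      _ < (f.1.length + 1) * f.1.length.factorial := by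
          exact (Nat.mul_lt_mul_right hpos).mpr (Nat.lt_succ_self _)
      _ = frameWeight f := by rw [frameWeight, hfac]
  omega

def findMapping_alt (s1 : String) (s2 : String) : Bool :=
  let queue := sortedFreq s1
  let goals := cumB 0 (sortedFreq s2)
  -- Python indexes queue[0]/goals[0]/goals[-1]: IndexError on an empty string (excluded by
  -- Pre_); the getD default is only taken there.
  if queue.getD 0 0 > goals.getD 0 0 then false
  else machine goals (goals.getD (goals.length - 1) 0) [(queue, 0, 0)]

-- ===== PRECONDITION & SPEC =====
-- Pre_ excludes exactly the inputs on which A raises: an empty s1 or s2 gives IndexError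
-- at queue[0] / goals[0] (B raises there too).
def Pre_findMapping (s1 : String) (s2 : String) : Prop := s1 ≠ "" ∧ s2 ≠ ""
instance (s1 : String) (s2 : String) : Decidable (Pre_findMapping s1 s2) := by
  unfold Pre_findMapping; infer_instance

def pvWitness_findMapping : String × String := ("aab", "abc")

def Spec_findMapping (s1 : String) (s2 : String) (out : Bool) : Prop := out = findMapping_alt s1 s2
instance (s1 : String) (s2 : String) (out : Bool) : Decidable (Spec_findMapping s1 s2 out) := by
  unfold Spec_findMapping; infer_instance

-- ===== CLAIM (what is proved, stated in full; the proofs are below) =====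
def Claim_equal_findMapping : Prop := ∀ (s1 : String) (s2 : String), Dom_findMapping s1 s2 → Pre_findMapping s1 s2 → Spec_findMapping s1 s2 (findMapping s1 s2)

-- ===== LEMMAS AND PROOFS =====

theorem cumFrom_eq_cumB (l : List Int) : ∀ (p : Int), cumFrom p l = cumB p l := by
  induction l with
  | nil => intro p; rfl
  | cons g rest ih =>
    intro p
    simp [cumFrom, cumB, Int.add_comm g p, ih]

theorem cumA_eq_cumB (gs : List Int) : cumA gs = cumB 0 gs := by
  cases gs with
  | nil => rfl
  | cons g rest => simp [cumA, cumB, cumFrom_eq_cumB]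

theorem cumA_getD_zero (gs : List Int) : (cumA gs).getD 0 0 = gs.getD 0 0 := by
  cases gs <;> rfl

-- scan of one frame vs one level of the recursion: a hit somewhere in the scan means the
-- recursion returns true at this level; otherwise the recursion succeeds iff some child does.
theorem scan_correct (goals : List Int) (paths : List Int) (current : Int) (nextGoal : Nat) :
    ∀ (iter : List Int) (h : iter.Sublist paths),
      mapDFSGo goals iter paths current nextGoal h =
        (match scanGo goals (goals.getD (goals.length - 1) 0) iter paths current nextGoal with
         | none => true
         | some cs => cs.any (fun c => mapDFS c.1 c.2.1 c.2.2 goals)) := by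
  intro iter
  induction iter with
  | nil => intro h; simp [mapDFSGo, scanGo]
  | cons path rest ih =>
    intro h
    have hrest : rest.Sublist paths := (List.sublist_cons_self path rest).trans h
    rw [mapDFSGo, scanGo]
    simp only
    by_cases h1 : current + path > goals.getD nextGoal 0
    · rw [if_pos h1, if_pos h1]
      exact ih _
    · rw [if_neg h1, if_neg h1]
      by_cases h2 : current + path = goals.getD (goals.length - 1) 0
      · rw [if_pos h2, if_pos h2]
      · rw [if_neg h2, if_neg h2]
        cases hsc : scanGo goals (goals.getD (goals.length - 1) 0) rest paths current nextGoal with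
        | none =>
          have hihr := ih hrest
          rw [hsc] at hihr
          simp only at hihr
          by_cases h3 : current + path = goals.getD nextGoal 0
          · rw [if_pos h3]
            simp [hihr]
          · rw [if_neg h3]
            simp [hihr]
        | some cs =>
          have hihr := ih hrest
          rw [hsc] at hihr
          simp only at hihr
          by_cases h3 : current + path = goals.getD nextGoal 0
          · rw [if_pos h3, if_pos h3, hihr]
            simp only [List.any_cons, mapDFS]
            cases hc : mapDFSGo goals (paths.erase path) (paths.erase path) (current + path)
                (nextGoal + 1) (List.Sublist.refl _) <;> simp
          · rw [if_neg h3, if_neg h3, hihr]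
            simp only [List.any_cons, mapDFS]
            cases hc : mapDFSGo goals (paths.erase path) (paths.erase path) (current + path)
                nextGoal (List.Sublist.refl _) <;> simp

theorem machine_correct (goals : List Int) (target : Int)
    (ht : target = goals.getD (goals.length - 1) 0) :
    ∀ (stack : List (List Int × Int × Nat)),
      machine goals target stack = stack.any (fun f => mapDFS f.1 f.2.1 f.2.2 goals) := by
  intro stack
  induction stack using machine.induct goals target with
  | case1 => simp [machine]
  | case2 f rest hsc =>
    have hlvl := scan_correct goals f.1 f.2.1 f.2.2 f.1 (List.Sublist.refl _)
    rw [← ht, hsc] at hlvl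
    simp only at hlvl
    rw [machine]
    split
    · simp [List.any_cons, mapDFS, hlvl]
    · next cs heq => rw [hsc] at heq; simp at heq
  | case3 f rest cs hsc ih =>
    have hlvl := scan_correct goals f.1 f.2.1 f.2.2 f.1 (List.Sublist.refl _)
    rw [← ht, hsc] at hlvl
    simp only at hlvl
    rw [machine]
    split
    · next heq => rw [hsc] at heq; simp at heq
    · next cs' heq =>
      rw [hsc] at heq
      obtain rfl : cs = cs' := Option.some.inj heq
      rw [ih]
      simp only [List.any_append, List.any_reverse, List.any_cons]
      rw [mapDFS] at ⊢
      rw [hlvl]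

-- ===== VERDICT (by name: the statement is the Claim_ definition above) =====
theorem findMapping_spec : Claim_equal_findMapping := by
  intro s1 s2 _ _
  show (if (sortedFreq s1).getD 0 0 > (sortedFreq s2).getD 0 0 then false
        else mapDFS (sortedFreq s1) 0 0 (cumA (sortedFreq s2))) =
       (if (sortedFreq s1).getD 0 0 > (cumB 0 (sortedFreq s2)).getD 0 0 then false
        else machine (cumB 0 (sortedFreq s2))
          ((cumB 0 (sortedFreq s2)).getD ((cumB 0 (sortedFreq s2)).length - 1) 0)
          [(sortedFreq s1, 0, 0)])
  rw [← cumA_eq_cumB, cumA_getD_zero, machine_correct _ _ rfl]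
  simp
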